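-- pv_equiv track=rewrite | github.com/Deepesh1024/ROCmForge-Porter | app/responsible_ai.py | build_reasoning_trace
-- ===== SOURCE A (Python) =====
-- from typing import Any, Dict, List
--
-- def build_reasoning_trace(
--     stage: str,
--     primitive: str,
--     backend: str,
--     safety_score: int,
--     extra_steps: List[str] | None = None,
-- ) -> List[str]:
--     """Build a step-by-step reasoning trace for audit/explainability."""
--     trace = [
--         f"[1] Received {stage} request for primitive: {primitive}",
--         f"[2] Hardware backend detected: {backend}",
--     ]
--
--     if stage == "parse":
--         trace += [
--             "[3] Applied mock hipify-clang (CUDA → HIP API translation)",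
--             "[4] Classified CUDA primitive via deterministic regex engine",
--             "[5] Ran Responsible-AI safety analysis on hipified code",
--         ]
--     elif stage == "generate":
--         trace += [
--             "[3] Selected template from verified template library (NO LLM code gen)",
--             "[4] Filled placeholders with extracted metadata (dtype, dims, tile_size)",
--             "[5] Ran Responsible-AI safety analysis on generated HIP code",
--         ]
--     elif stage == "verify":
--         trace += [
--             f"[3] Executed verification on backend: {backend}",
--             "[4] Computed CPU reference output via NumPy",
--             "[5] Compared reference vs device output (L2 norm)",
--         ]
--     else:
--         trace.append(f"[3] Executed stage: {stage}")
--
--     trace.append(f"[{len(trace) + 1}] Safety score computed: {safety_score}/100")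
--     trace.append(f"[{len(trace) + 1}] Audit log written with full provenance")
--
--     if extra_steps:
--         for i, step in enumerate(extra_steps):
--             trace.append(f"[{len(trace) + 1}] {step}")
--
--     return trace
-- ===== SOURCE B (Python) =====
-- def build_reasoning_trace(
--     stage,
--     primitive,
--     backend,
--     safety_score,
--     extra_steps=None,
-- ):
--     """Build a step-by-step reasoning trace for audit/explainability."""
--     if stage == "parse":
--         stage_bodies = [
--             "Applied mock hipify-clang (CUDA → HIP API translation)",
--             "Classified CUDA primitive via deterministic regex engine",
--             "Ran Responsible-AI safety analysis on hipified code",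
--         ]
--     elif stage == "generate":
--         stage_bodies = [
--             "Selected template from verified template library (NO LLM code gen)",
--             "Filled placeholders with extracted metadata (dtype, dims, tile_size)",
--             "Ran Responsible-AI safety analysis on generated HIP code",
--         ]
--     elif stage == "verify":
--         stage_bodies = [
--             f"Executed verification on backend: {backend}",
--             "Computed CPU reference output via NumPy",
--             "Compared reference vs device output (L2 norm)",
--         ]
--     else:
--         stage_bodies = [f"Executed stage: {stage}"]
--
--     bodies = (
--         [
--             f"Received {stage} request for primitive: {primitive}",
--             f"Hardware backend detected: {backend}",
--         ]
--         + stage_bodies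
--         + [
--             f"Safety score computed: {safety_score}/100",
--             "Audit log written with full provenance",
--         ]
--         + (list(extra_steps) if extra_steps else [])
--     )
--
--     return [f"[{i + 1}] {body}" for i, body in enumerate(bodies)]
-- ===== Notes on version B (the rewrite author's own statement) =====
-- stated objective: simpler
-- what changed: B builds one flat list of unnumbered message bodies (headers, stage bodies, safety/audit lines, extras) and adds every '[k]' prefix in a single trailing enumerate pass, instead of A's interleaved hard-coded and len(trace)+1 numbering.
import Mathlib
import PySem

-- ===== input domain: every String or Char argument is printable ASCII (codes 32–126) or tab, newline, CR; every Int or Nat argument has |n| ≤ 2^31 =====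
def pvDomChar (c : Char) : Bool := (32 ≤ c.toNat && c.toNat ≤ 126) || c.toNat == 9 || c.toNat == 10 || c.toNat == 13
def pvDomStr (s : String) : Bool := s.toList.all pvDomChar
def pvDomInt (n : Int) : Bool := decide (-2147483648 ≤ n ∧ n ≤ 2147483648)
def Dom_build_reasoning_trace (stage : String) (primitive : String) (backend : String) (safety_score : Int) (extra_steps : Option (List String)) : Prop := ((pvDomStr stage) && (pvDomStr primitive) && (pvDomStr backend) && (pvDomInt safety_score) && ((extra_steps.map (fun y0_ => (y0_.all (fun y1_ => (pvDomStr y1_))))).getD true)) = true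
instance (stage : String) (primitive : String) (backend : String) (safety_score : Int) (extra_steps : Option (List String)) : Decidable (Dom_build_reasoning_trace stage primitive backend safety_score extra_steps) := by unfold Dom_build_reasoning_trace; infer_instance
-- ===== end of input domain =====

-- B is simpler: every '[k]' number is moved out of the literals into a single
-- trailing numbering pass (enumerate) over a flat list of message bodies.

-- ===== PORT A =====
def build_reasoning_trace (stage : String) (primitive : String) (backend : String) (safety_score : Int) (extra_steps : Option (List String)) : List String :=
  let trace : List String :=
    ["[1] Received " ++ stage ++ " request for primitive: " ++ primitive,
     "[2] Hardware backend detected: " ++ backend]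
  let trace :=
    if stage = "parse" then
      trace ++
        ["[3] Applied mock hipify-clang (CUDA → HIP API translation)",
         "[4] Classified CUDA primitive via deterministic regex engine",
         "[5] Ran Responsible-AI safety analysis on hipified code"]
    else if stage = "generate" then
      trace ++
        ["[3] Selected template from verified template library (NO LLM code gen)",
         "[4] Filled placeholders with extracted metadata (dtype, dims, tile_size)",
         "[5] Ran Responsible-AI safety analysis on generated HIP code"]
    else if stage = "verify" then
      trace ++
        ["[3] Executed verification on backend: " ++ backend,
         "[4] Computed CPU reference output via NumPy",
         "[5] Compared reference vs device output (L2 norm)"]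
    else
      trace ++ ["[3] Executed stage: " ++ stage]
  let trace := trace ++ ["[" ++ PySem.Int.toStr ((trace.length : Int) + 1) ++ "] Safety score computed: " ++ PySem.Int.toStr safety_score ++ "/100"]
  let trace := trace ++ ["[" ++ PySem.Int.toStr ((trace.length : Int) + 1) ++ "] Audit log written with full provenance"]
  match extra_steps with
  | none => trace
  | some steps =>
    if steps.isEmpty then trace
    else steps.foldl (fun t s => t ++ ["[" ++ PySem.Int.toStr ((t.length : Int) + 1) ++ "] " ++ s]) trace

-- ===== PORT B =====
def build_reasoning_trace_alt (stage : String) (primitive : String) (backend : String) (safety_score : Int) (extra_steps : Option (List String)) : List String :=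
  let stage_bodies : List String :=
    if stage = "parse" then
      ["Applied mock hipify-clang (CUDA → HIP API translation)",
       "Classified CUDA primitive via deterministic regex engine",
       "Ran Responsible-AI safety analysis on hipified code"]
    else if stage = "generate" then
      ["Selected template from verified template library (NO LLM code gen)",
       "Filled placeholders with extracted metadata (dtype, dims, tile_size)",
       "Ran Responsible-AI safety analysis on generated HIP code"]
    else if stage = "verify" then
      ["Executed verification on backend: " ++ backend,
       "Computed CPU reference output via NumPy",
       "Compared reference vs device output (L2 norm)"]
    else
      ["Executed stage: " ++ stage]
  let bodies : List String :=
    ["Received " ++ stage ++ " request for primitive: " ++ primitive,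
     "Hardware backend detected: " ++ backend]
    ++ stage_bodies
    ++ ["Safety score computed: " ++ PySem.Int.toStr safety_score ++ "/100",
        "Audit log written with full provenance"]
    ++ (if (extra_steps.getD []).isEmpty then [] else extra_steps.getD [])
  (PySem.List.enumerate bodies).map (fun p => "[" ++ PySem.Int.toStr (p.1 + 1) ++ "] " ++ p.2)

-- ===== PRECONDITION & SPEC =====
def Spec_build_reasoning_trace (stage : String) (primitive : String) (backend : String) (safety_score : Int) (extra_steps : Option (List String)) (out : List String) : Prop := out = build_reasoning_trace_alt stage primitive backend safety_score extra_steps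
instance (stage : String) (primitive : String) (backend : String) (safety_score : Int) (extra_steps : Option (List String)) (out : List String) : Decidable (Spec_build_reasoning_trace stage primitive backend safety_score extra_steps out) := by unfold Spec_build_reasoning_trace; infer_instance

-- ===== CLAIM (what is proved, stated in full; the proofs are below) =====
def Claim_equal_build_reasoning_trace : Prop := ∀ (stage : String) (primitive : String) (backend : String) (safety_score : Int) (extra_steps : Option (List String)), Dom_build_reasoning_trace stage primitive backend safety_score extra_steps → Spec_build_reasoning_trace stage primitive backend safety_score extra_steps (build_reasoning_trace stage primitive backend safety_score extra_steps)

-- ===== LEMMAS AND PROOFS =====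

-- numbering a list of bodies starting at k: the common shape of both programs
def pvNumFrom (k : Int) : List String → List String
  | [] => []
  | b :: bs => ("[" ++ PySem.Int.toStr k ++ "] " ++ b) :: pvNumFrom (k + 1) bs

theorem pvEnum_map (bodies : List String) : ∀ k : Int,
    (PySem.List.enumerate bodies k).map (fun p => "[" ++ PySem.Int.toStr (p.1 + 1) ++ "] " ++ p.2)
      = pvNumFrom (k + 1) bodies := by
  induction bodies with
  | nil => intro k; simp [PySem.List.enumerate_nil, pvNumFrom]
  | cons b bs ih => intro k; simp [PySem.List.enumerate_cons, pvNumFrom, ih]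

theorem pvNumFrom_append (xs ys : List String) : ∀ k : Int,
    pvNumFrom k (xs ++ ys) = pvNumFrom k xs ++ pvNumFrom (k + xs.length) ys := by
  induction xs with
  | nil => intro k; simp [pvNumFrom]
  | cons x xs ih =>
    intro k
    have h : (k + 1) + (xs.length : Int) = k + (((x :: xs).length : Int)) := by
      simp only [List.length_cons]; push_cast; ring
    simp only [List.cons_append, pvNumFrom, ih, h]

theorem pvFold_num (steps : List String) : ∀ tr : List String,
    steps.foldl (fun t s => t ++ ["[" ++ PySem.Int.toStr ((t.length : Int) + 1) ++ "] " ++ s]) tr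
      = tr ++ pvNumFrom ((tr.length : Int) + 1) steps := by
  induction steps with
  | nil => intro tr; simp [pvNumFrom]
  | cons s ss ih =>
    intro tr
    simp only [List.foldl_cons, ih, List.length_append, List.length_cons, List.length_nil,
      pvNumFrom, List.append_assoc, List.cons_append, List.nil_append]
    congr 2 <;> omega

-- simp facts for the literal numbers produced by toStr on both sides
theorem pvToStr1 : PySem.Int.toStr 1 = "1" := by decide
theorem pvToStr2 : PySem.Int.toStr 2 = "2" := by decide
theorem pvToStr3 : PySem.Int.toStr 3 = "3" := by decide
theorem pvToStr4 : PySem.Int.toStr 4 = "4" := by decide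
theorem pvToStr5 : PySem.Int.toStr 5 = "5" := by decide
theorem pvToStr6 : PySem.Int.toStr 6 = "6" := by decide
theorem pvToStr7 : PySem.Int.toStr 7 = "7" := by decide

-- ===== VERDICT (by name: the statement is the Claim_ definition above) =====
theorem build_reasoning_trace_spec : Claim_equal_build_reasoning_trace := by
  intro stage primitive backend safety_score extra_steps _
  unfold Spec_build_reasoning_trace build_reasoning_trace build_reasoning_trace_alt
  cases extra_steps with
  | none =>
    by_cases h1 : stage = "parse" <;> by_cases h2 : stage = "generate" <;> by_cases h3 : stage = "verify" <;>
    simp [h1, h2, h3, pvEnum_map, pvNumFrom_append, pvNumFrom, pvFold_num,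
      pvToStr1, pvToStr2, pvToStr3, pvToStr4, pvToStr5, pvToStr6, pvToStr7,
      ← String.append_assoc]
  | some steps =>
    by_cases he : steps.isEmpty <;>
    by_cases h1 : stage = "parse" <;> by_cases h2 : stage = "generate" <;> by_cases h3 : stage = "verify" <;>
    simp [he, h1, h2, h3, pvEnum_map, pvNumFrom_append, pvNumFrom, pvFold_num,
      pvToStr1, pvToStr2, pvToStr3, pvToStr4, pvToStr5, pvToStr6, pvToStr7,
      ← String.append_assoc]
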